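-- pv_equiv track=rewrite | github.com/pypi-data/pypi-mirror-391 | packages/lazysdk/lazysdk-0.1.126-py3-none-any.whl/lazysdk/lazyua.py | dict_values_match
-- ===== SOURCE A (Python) =====
-- def dict_values_match(
--         dict_a: dict,
--         dict_b: dict,
--         ignore_values: list = None  # 忽略值，例如：['Other', None]
-- ):
--     """
--     统计字典的value匹配量
--     """
--     dict_keys = list()
--     dict_keys.extend(dict_a.keys())
--     dict_keys.extend(dict_b.keys())
--     dict_keys = set(dict_keys)
--     count_all = 0  # 有效比对元素总数
--     count_match = 0  # 对比结果匹配数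
--     for user_agent_key in dict_keys:
--         each_value_a = dict_a.get(user_agent_key)
--         each_value_b = dict_b.get(user_agent_key)
--         if each_value_a == each_value_b:
--             if ignore_values is not None and each_value_a in ignore_values:
--                 continue
--             else:
--                 count_all += 1
--                 count_match += 1
--         else:
--             count_all += 1
--     return {'count_all': count_all, 'count_match': count_match}
-- ===== SOURCE B (Python) =====
-- def dict_values_match(
--         dict_a: dict,
--         dict_b: dict,
--         ignore_values: list = None
-- ):
--     """Count matching values over the union of keys, by set sizes instead of an accumulator loop."""
--     keys = set(dict_a) | set(dict_b)
--     matches = {k for k in keys if dict_a.get(k) == dict_b.get(k)}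
--     if ignore_values is None:
--         skipped = 0
--     else:
--         skipped = sum(1 for k in matches if dict_a.get(k) in ignore_values)
--     return {'count_all': len(keys) - skipped, 'count_match': len(matches) - skipped}
-- ===== Notes on version B (the rewrite author's own statement) =====
-- stated objective: simpler
-- what changed: Replaces A's per-key accumulator loop with counting by set sizes: build the key union and the set of matching keys, count the ignored matches once, and obtain count_all and count_match by subtraction.
import Mathlib
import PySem

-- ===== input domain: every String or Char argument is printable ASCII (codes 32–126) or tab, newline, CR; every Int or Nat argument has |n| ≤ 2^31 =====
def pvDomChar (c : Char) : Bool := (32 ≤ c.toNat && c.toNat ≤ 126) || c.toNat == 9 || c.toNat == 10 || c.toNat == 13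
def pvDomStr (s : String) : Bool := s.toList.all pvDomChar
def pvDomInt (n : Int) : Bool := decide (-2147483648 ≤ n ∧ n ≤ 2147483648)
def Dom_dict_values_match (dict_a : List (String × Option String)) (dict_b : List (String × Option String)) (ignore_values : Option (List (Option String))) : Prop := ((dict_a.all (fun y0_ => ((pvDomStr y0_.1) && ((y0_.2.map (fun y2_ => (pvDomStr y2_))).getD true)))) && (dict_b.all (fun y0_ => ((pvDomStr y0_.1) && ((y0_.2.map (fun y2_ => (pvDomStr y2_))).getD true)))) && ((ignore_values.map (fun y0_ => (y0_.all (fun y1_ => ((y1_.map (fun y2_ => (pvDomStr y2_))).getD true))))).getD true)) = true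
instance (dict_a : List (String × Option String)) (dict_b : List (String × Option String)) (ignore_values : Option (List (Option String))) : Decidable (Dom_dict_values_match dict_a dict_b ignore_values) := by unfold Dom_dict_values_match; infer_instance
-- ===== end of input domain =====

-- B replaces A's accumulator loop over the key union by set/filter sizes and one subtraction (same O(n·m) cost; alternative decomposition).

-- ===== PORT A =====
def dict_values_match (dict_a : List (String × Option String)) (dict_b : List (String × Option String)) (ignore_values : Option (List (Option String))) : List (String × Int) :=
  let dict_keys : PySem.Set String :=
    PySem.Set.ofList ((PySem.Dict.mk dict_a).keys ++ (PySem.Dict.mk dict_b).keys)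
  let counts : Int × Int := dict_keys.foldl (fun (c : Int × Int) user_agent_key =>
    let each_value_a : Option String := PySem.Dict.getD (PySem.Dict.mk dict_a) user_agent_key none
    let each_value_b : Option String := PySem.Dict.getD (PySem.Dict.mk dict_b) user_agent_key none
    if each_value_a == each_value_b then
      if (match ignore_values with
          | some l => l.contains each_value_a
          | none => false) then c
      else (c.1 + 1, c.2 + 1)
    else (c.1 + 1, c.2)) (0, 0)
  [("count_all", counts.1), ("count_match", counts.2)]

-- ===== PORT B =====
def dict_values_match_alt (dict_a : List (String × Option String)) (dict_b : List (String × Option String)) (ignore_values : Option (List (Option String))) : List (String × Int) :=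
  let keys : PySem.Set String :=
    PySem.Set.union (PySem.Set.ofList (PySem.Dict.mk dict_a).keys) (PySem.Set.ofList (PySem.Dict.mk dict_b).keys)
  let matched : PySem.Set String :=
    keys.filter (fun k => PySem.Dict.getD (PySem.Dict.mk dict_a) k none == PySem.Dict.getD (PySem.Dict.mk dict_b) k none)
  let skipped : Int :=
    match ignore_values with
    | none => 0
    | some l => ((matched.filter (fun k => l.contains (PySem.Dict.getD (PySem.Dict.mk dict_a) k none))).length : Int)
  [("count_all", (keys.length : Int) - skipped), ("count_match", (matched.length : Int) - skipped)]

-- ===== PRECONDITION & SPEC =====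
def Spec_dict_values_match (dict_a : List (String × Option String)) (dict_b : List (String × Option String)) (ignore_values : Option (List (Option String))) (out : List (String × Int)) : Prop := out = dict_values_match_alt dict_a dict_b ignore_values
instance (dict_a : List (String × Option String)) (dict_b : List (String × Option String)) (ignore_values : Option (List (Option String))) (out : List (String × Int)) : Decidable (Spec_dict_values_match dict_a dict_b ignore_values out) := by unfold Spec_dict_values_match; infer_instance

-- ===== CLAIM (what is proved, stated in full; the proofs are below) =====
def Claim_equal_dict_values_match : Prop := ∀ (dict_a : List (String × Option String)) (dict_b : List (String × Option String)) (ignore_values : Option (List (Option String))), Dom_dict_values_match dict_a dict_b ignore_values → Spec_dict_values_match dict_a dict_b ignore_values (dict_values_match dict_a dict_b ignore_values)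

-- ===== LEMMAS AND PROOFS =====

-- A's loop computes, from (x, y), x + #{k | ¬(p k ∧ q k)} and y + #{k | p k ∧ ¬ q k}.
lemma pv_foldl_count (p q : String → Bool) (l : List String) (x y : Int) :
    l.foldl (fun (c : Int × Int) k =>
      if p k then (if q k then c else (c.1 + 1, c.2 + 1)) else (c.1 + 1, c.2)) (x, y)
    = (x + ((l.filter (fun k => !p k || !q k)).length : Int),
       y + ((l.filter (fun k => p k && !q k)).length : Int)) := by
  induction l generalizing x y with
  | nil => simp
  | cons a l ih =>
    by_cases hp : p a = true <;> by_cases hq : q a = true <;>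
      simp [hp, hq, ih] <;> omega

lemma pv_len_all (p q : String → Bool) (l : List String) :
    (l.filter (fun k => !p k || !q k)).length + (l.filter (fun k => q k && p k)).length
      = l.length := by
  induction l with
  | nil => simp
  | cons a l ih =>
    by_cases hp : p a = true <;> by_cases hq : q a = true <;> simp [hp, hq] <;> omega

lemma pv_len_match (p q : String → Bool) (l : List String) :
    (l.filter (fun k => p k && !q k)).length + (l.filter (fun k => q k && p k)).length
      = (l.filter p).length := by
  induction l with
  | nil => simp
  | cons a l ih =>
    by_cases hp : p a = true <;> by_cases hq : q a = true <;> simp [hp, hq] <;> omega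

-- B's key set equals A's: set(a) | set(b) = set(keys(a) ++ keys(b)).
lemma pv_union_eq (ka kb : List String) :
    PySem.Set.union (PySem.Set.ofList ka) (PySem.Set.ofList kb)
      = PySem.Set.ofList (ka ++ kb) := by
  show PySem.Set.update (PySem.Set.ofList ka) (PySem.Set.ofList kb) = _
  rw [PySem.Set.update_eq_append_filter, PySem.Set.ofList_ofList,
      PySem.Set.ofList_append, PySem.Set.update_eq_append_filter]

lemma pv_main (dict_a dict_b : List (String × Option String))
    (ignore_values : Option (List (Option String))) :
    dict_values_match dict_a dict_b ignore_values
      = dict_values_match_alt dict_a dict_b ignore_values := by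
  unfold dict_values_match dict_values_match_alt
  rw [pv_union_eq]
  cases ignore_values with
  | none =>
    simp only [pv_foldl_count]
    simp
  | some ign =>
    simp only [pv_foldl_count, List.filter_filter]
    have h1 := pv_len_all
      (fun k => PySem.Dict.getD (PySem.Dict.mk dict_a) k none == PySem.Dict.getD (PySem.Dict.mk dict_b) k none)
      (fun k => ign.contains (PySem.Dict.getD (PySem.Dict.mk dict_a) k none))
      (PySem.Set.ofList ((PySem.Dict.mk dict_a).keys ++ (PySem.Dict.mk dict_b).keys))
    have h2 := pv_len_match
      (fun k => PySem.Dict.getD (PySem.Dict.mk dict_a) k none == PySem.Dict.getD (PySem.Dict.mk dict_b) k none)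
      (fun k => ign.contains (PySem.Dict.getD (PySem.Dict.mk dict_a) k none))
      (PySem.Set.ofList ((PySem.Dict.mk dict_a).keys ++ (PySem.Dict.mk dict_b).keys))
    simp only [List.cons.injEq, Prod.mk.injEq, and_true, true_and]
    constructor <;> omega

-- ===== VERDICT (by name: the statement is the Claim_ definition above) =====
theorem dict_values_match_spec : Claim_equal_dict_values_match := by
  intro dict_a dict_b ignore_values _
  exact pv_main dict_a dict_b ignore_values
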